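-- pv_equiv track=rewrite | github.com/sidd1801/BT-group-BOOTCAMP | challenges/challenge-040-factorial-pattern/solution.py | factorial_pattern
-- ===== SOURCE A (Python) =====
-- import math
--
-- def factorial_pattern(n):
--     """
--     Returns a list of rows where factorials
--     are printed in increasing sequence.
--     Example (n = 3):
--     1
--     1 2
--     6 24 120
--     """
--     num = 1
--     output = []
--
--     for row_len in range(1, n + 1):
--         row = []
--         for _ in range(row_len):
--             row.append(math.factorial(num))
--             num += 1
--         output.append(row)
--
--     return output
-- ===== SOURCE B (Python) =====
-- def factorial_pattern(n):
--     # One running product: build the flat list of all needed factorials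
--     # with one multiplication each, then cut it into rows of increasing length.
--     total = n * (n + 1) // 2 if n > 0 else 0
--     facts = []
--     f = 1
--     for k in range(1, total + 1):
--         f *= k
--         facts.append(f)
--     output = []
--     i = 0
--     for row_len in range(1, n + 1):
--         output.append(facts[i:i + row_len])
--         i += row_len
--     return output
-- ===== Notes on version B (the rewrite author's own statement) =====
-- stated objective: faster
-- what changed: B replaces A's per-term math.factorial recomputation inside nested loops by a single running product that builds the flat list of all needed factorials with one multiplication per term and then slices it into consecutive rows of increasing length; intended as faster (a timing run measured B about twelve times faster at the largest size both finished, unconfirmed beyond that because A times out).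
import Mathlib
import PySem

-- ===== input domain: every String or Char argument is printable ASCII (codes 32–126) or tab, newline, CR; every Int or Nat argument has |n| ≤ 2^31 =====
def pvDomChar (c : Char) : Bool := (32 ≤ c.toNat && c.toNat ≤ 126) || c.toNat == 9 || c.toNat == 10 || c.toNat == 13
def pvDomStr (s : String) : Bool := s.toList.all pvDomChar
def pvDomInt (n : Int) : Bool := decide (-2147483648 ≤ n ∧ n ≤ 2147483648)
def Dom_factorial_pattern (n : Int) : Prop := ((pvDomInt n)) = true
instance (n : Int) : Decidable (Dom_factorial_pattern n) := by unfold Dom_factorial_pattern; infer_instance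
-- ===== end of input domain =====

-- B builds all needed factorials with one running product (one multiplication per term) and slices
-- the flat list into consecutive rows, instead of A's per-term math.factorial recomputation;
-- intended as faster (a timing run measured B about twelve times faster at the largest size both finished).

-- ===== PORT A =====
-- A: for each row length in turn, append math.factorial(num) that many times, num counting up.
def factorial_pattern (n : Int) : List (List Int) :=
  let st := (PySem.List.pyRange 1 (n + 1) 1).foldl
    (fun (st : Int × List (List Int)) row_len =>
      let inner := (PySem.List.pyRange 0 row_len 1).foldl
        (fun (st2 : Int × List Int) _ =>
          (st2.1 + 1, st2.2 ++ [(Nat.factorial st2.1.toNat : Int)]))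
        (st.1, ([] : List Int))
      (inner.1, st.2 ++ [inner.2]))
    ((1 : Int), ([] : List (List Int)))
  st.2

-- ===== PORT B =====
-- B: running-product flat factorial list, then cut into rows by slicing.
def factorial_pattern_alt (n : Int) : List (List Int) :=
  let total : Int := if n > 0 then PySem.Int.floordiv (n * (n + 1)) 2 else 0
  let fp := (PySem.List.pyRange 1 (total + 1) 1).foldl
    (fun (st : Int × List Int) k => (st.1 * k, st.2 ++ [st.1 * k]))
    ((1 : Int), ([] : List Int))
  let facts := fp.2
  let op := (PySem.List.pyRange 1 (n + 1) 1).foldl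
    (fun (st : List (List Int) × Int) row_len =>
      (st.1 ++ [PySem.List.slice facts (some st.2) (some (st.2 + row_len))], st.2 + row_len))
    (([] : List (List Int)), (0 : Int))
  op.1

-- ===== PRECONDITION & SPEC =====
def Spec_factorial_pattern (n : Int) (out : List (List Int)) : Prop := out = factorial_pattern_alt n
instance (n : Int) (out : List (List Int)) : Decidable (Spec_factorial_pattern n out) := by unfold Spec_factorial_pattern; infer_instance

-- ===== CLAIM (what is proved, stated in full; the proofs are below) =====
def Claim_equal_factorial_pattern : Prop := ∀ (n : Int), Dom_factorial_pattern n → Spec_factorial_pattern n (factorial_pattern n)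

-- ===== LEMMAS AND PROOFS =====

-- reference: triangular numbers, a row of consecutive factorials, the whole output
def pvTri (m : Nat) : Nat := m * (m + 1) / 2
def pvRow (s len : Nat) : List Int := (List.range len).map (fun i => (Nat.factorial (s + i) : Int))
def pvOut (m : Nat) : List (List Int) := (List.range m).map (fun j => pvRow (pvTri j + 1) (j + 1))

lemma pvTri_succ (m : Nat) : pvTri (m + 1) = pvTri m + (m + 1) := by
  unfold pvTri
  have h : (m + 1) * (m + 1 + 1) = m * (m + 1) + (m + 1) * 2 := by ring
  rw [h, Nat.add_mul_div_right _ _ (by norm_num)]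

lemma pvRow_succ (s len : Nat) :
    pvRow s (len + 1) = pvRow s len ++ [(Nat.factorial (s + len) : Int)] := by
  simp [pvRow, List.range_succ]

lemma pvOut_succ (m : Nat) :
    pvOut (m + 1) = pvOut m ++ [pvRow (pvTri m + 1) (m + 1)] := by
  simp [pvOut, List.range_succ]

-- A's inner loop
lemma innerA (m s : Nat) (acc : List Int) :
    (PySem.List.pyRange 0 (m : Int) 1).foldl
      (fun (st2 : Int × List Int) _ =>
        (st2.1 + 1, st2.2 ++ [(Nat.factorial st2.1.toNat : Int)]))
      ((s : Int), acc)
    = ((s : Int) + m, acc ++ pvRow s m) := by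
  induction m generalizing acc with
  | zero => simp [PySem.List.pyRange_one_eq_nil, pvRow]
  | succ k ih =>
    have h : ((k + 1 : Nat) : Int) = (k : Int) + 1 := by push_cast; ring
    rw [h, PySem.List.pyRange_one_succ_right (by omega), List.foldl_append, ih]
    simp only [List.foldl_cons, List.foldl_nil, Prod.mk.injEq]
    refine ⟨by omega, ?_⟩
    have ht : ((s : Int) + (k : Int)).toNat = s + k := by omega
    rw [pvRow_succ, ← List.append_assoc, ht]

-- A's outer loop
lemma outerA (m : Nat) :
    (PySem.List.pyRange 1 ((m : Int) + 1) 1).foldl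
      (fun (st : Int × List (List Int)) row_len =>
        let inner := (PySem.List.pyRange 0 row_len 1).foldl
          (fun (st2 : Int × List Int) _ =>
            (st2.1 + 1, st2.2 ++ [(Nat.factorial st2.1.toNat : Int)]))
          (st.1, ([] : List Int))
        (inner.1, st.2 ++ [inner.2]))
      ((1 : Int), ([] : List (List Int)))
    = (((pvTri m : Nat) : Int) + 1, pvOut m) := by
  induction m with
  | zero => simp [PySem.List.pyRange_one_eq_nil, pvTri, pvOut]
  | succ k ih =>
    have h : (((k + 1 : Nat) : Int) + 1) = ((k : Int) + 1) + 1 := by push_cast; ring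
    rw [h, PySem.List.pyRange_one_succ_right (by omega), List.foldl_append, ih]
    have hs : ((pvTri k : Nat) : Int) + 1 = ((pvTri k + 1 : Nat) : Int) := by push_cast; ring
    have hk : ((k : Int) + 1) = ((k + 1 : Nat) : Int) := by push_cast; ring
    simp only [List.foldl_cons, List.foldl_nil, hs, hk, innerA]
    rw [pvOut_succ, Prod.ext_iff]
    refine ⟨by push_cast [pvTri_succ]; ring, by simp⟩

lemma portA (n : Int) : factorial_pattern n = pvOut n.toNat := by
  unfold factorial_pattern
  by_cases h : n ≤ 0
  · rw [PySem.List.pyRange_one_eq_nil (by omega)]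
    simp [pvOut, Int.toNat_of_nonpos h]
  · have hn : n = (n.toNat : Int) := (Int.toNat_of_nonneg (by omega)).symm
    rw [hn, outerA]
    dsimp only
    rw [Int.toNat_natCast]

-- B's running-product loop builds the flat factorial list pvRow 1 t
lemma factsB (t : Nat) :
    (PySem.List.pyRange 1 ((t : Int) + 1) 1).foldl
      (fun (st : Int × List Int) k => (st.1 * k, st.2 ++ [st.1 * k]))
      ((1 : Int), ([] : List Int))
    = ((Nat.factorial t : Int), pvRow 1 t) := by
  induction t with
  | zero => simp [PySem.List.pyRange_one_eq_nil, pvRow, Nat.factorial]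
  | succ k ih =>
    have h : (((k + 1 : Nat) : Int) + 1) = ((k : Int) + 1) + 1 := by push_cast; ring
    rw [h, PySem.List.pyRange_one_succ_right (by omega), List.foldl_append, ih]
    have hf : (Nat.factorial k : Int) * ((k : Int) + 1) = (Nat.factorial (1 + k) : Int) := by
      rw [Nat.add_comm 1 k]
      push_cast [Nat.factorial_succ]
      ring
    simp only [List.foldl_cons, List.foldl_nil]
    rw [Prod.ext_iff]
    refine ⟨by dsimp only; rw [hf, Nat.add_comm 1 k], ?_⟩
    dsimp only
    rw [pvRow_succ, hf]

-- slicing the flat list gives a row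
lemma slice_pvRow (a b T : Nat) (h : a + b ≤ T) :
    PySem.List.slice (pvRow 1 T) (some (a : Int)) (some ((a : Int) + ((b : Nat) : Int))) =
      pvRow (a + 1) b := by
  rw [PySem.List.slice_natCast_add]
  apply List.ext_getElem
  · simp only [List.length_take, List.length_drop, pvRow, List.length_map, List.length_range]
    omega
  · intro k h1 h2
    simp only [pvRow, List.getElem_take, List.getElem_drop, List.getElem_map, List.getElem_range]
    congr 2
    omega

-- B's slicing loop
lemma sliceB (m T : Nat) (hT : pvTri m ≤ T) :
    (PySem.List.pyRange 1 ((m : Int) + 1) 1).foldl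
      (fun (st : List (List Int) × Int) row_len =>
        (st.1 ++ [PySem.List.slice (pvRow 1 T) (some st.2) (some (st.2 + row_len))], st.2 + row_len))
      (([] : List (List Int)), (0 : Int))
    = (pvOut m, ((pvTri m : Nat) : Int)) := by
  induction m with
  | zero => simp [PySem.List.pyRange_one_eq_nil, pvOut, pvTri]
  | succ k ih =>
    have hk : pvTri k ≤ T := by have := pvTri_succ k; omega
    have h : (((k + 1 : Nat) : Int) + 1) = ((k : Int) + 1) + 1 := by push_cast; ring
    rw [h, PySem.List.pyRange_one_succ_right (by omega), List.foldl_append, ih hk]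
    have hb : ((k : Int) + 1) = (((k + 1 : Nat) : Nat) : Int) := by push_cast; ring
    simp only [List.foldl_cons, List.foldl_nil, hb]
    rw [slice_pvRow (pvTri k) (k + 1) T (by have := pvTri_succ k; omega)]
    rw [pvOut_succ, Prod.ext_iff]
    refine ⟨rfl, by dsimp only; push_cast [pvTri_succ]; ring⟩

lemma portB (n : Int) : factorial_pattern_alt n = pvOut n.toNat := by
  unfold factorial_pattern_alt
  by_cases h : n ≤ 0
  · rw [if_neg (by omega)]
    rw [PySem.List.pyRange_one_eq_nil (a := 1) (b := n + 1) (by omega)]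
    simp [pvOut, Int.toNat_of_nonpos h, PySem.List.pyRange_one_eq_nil]
  · have hn : n = (n.toNat : Int) := (Int.toNat_of_nonneg (by omega)).symm
    set m := n.toNat with hm
    have htotal : (if n > 0 then PySem.Int.floordiv (n * (n + 1)) 2 else 0)
        = ((pvTri m : Nat) : Int) := by
      rw [if_pos (by omega)]
      rw [hn]
      have h1 : ((m : Int) * ((m : Int) + 1)) = ((m * (m + 1) : Nat) : Int) := by push_cast; ring
      rw [h1]
      have h2 : ((2 : Int)) = ((2 : Nat) : Int) := by norm_num
      rw [h2, PySem.Int.floordiv_natCast]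
      rfl
    rw [htotal]
    dsimp only
    rw [factsB]
    conv_lhs => rw [hn]
    rw [sliceB m (pvTri m) le_rfl]

-- ===== VERDICT (by name: the statement is the Claim_ definition above) =====
theorem factorial_pattern_spec : Claim_equal_factorial_pattern := by
  intro n _
  unfold Spec_factorial_pattern
  rw [portA, portB]
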